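-- pv_equiv track=rewrite | github.com/miyashiiii/AtCoder | ABC222/C.py | order_from_scores
-- ===== SOURCE A (Python) =====
-- def order_from_scores(scores):
--     score_dict = {}
--     for i, s in enumerate(scores):
--         if s in score_dict:
--             score_dict[s].append(i)
--         else:
--             score_dict[s] = [i]
--     sorted_tuple = sorted(score_dict.items(), reverse=True)
--     ret = []
--     for k, v in sorted_tuple:
--         ret += v
--     return ret
-- ===== SOURCE B (Python) =====
-- def order_from_scores(scores):
--     return sorted(range(len(scores)), key=lambda i: scores[i], reverse=True)
-- ===== Notes on version B (the rewrite author's own statement) =====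
-- stated objective: simpler
-- what changed: Replaced A's dict bucketing by score plus a sort over the distinct (score, index-list) items with one stable key-sort of the index range (sorted(range(n), key=..., reverse=True)); no dict is built.
import Mathlib
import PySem

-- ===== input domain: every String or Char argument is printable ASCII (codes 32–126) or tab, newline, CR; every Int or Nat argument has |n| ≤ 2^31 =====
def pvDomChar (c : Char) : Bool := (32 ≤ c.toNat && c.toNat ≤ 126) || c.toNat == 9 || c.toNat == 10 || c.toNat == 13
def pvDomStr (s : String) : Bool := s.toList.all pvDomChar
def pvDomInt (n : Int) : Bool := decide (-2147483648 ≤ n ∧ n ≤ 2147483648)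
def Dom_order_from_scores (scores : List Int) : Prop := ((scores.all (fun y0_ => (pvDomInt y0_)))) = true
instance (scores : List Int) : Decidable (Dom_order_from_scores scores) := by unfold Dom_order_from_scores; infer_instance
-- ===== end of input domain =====

-- B replaces A's dict-bucketing + sort over distinct scores by one stable key-sort of the index range (simpler, same result).

-- ===== PORT A =====
-- score_dict built by the enumerate loop; 'sorted(score_dict.items(), reverse=True)' compares (key, value) tuples,
-- but a dict's keys are distinct, so Python never reaches the list component: sorting by the key alone is exact here.
def order_from_scores (scores : List Int) : List Int :=
  let d : PySem.Dict Int (List Int) :=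
    (PySem.List.enumerate scores).foldl
      (fun d p => if d.contains p.2 then d.modify p.2 [] (fun v => v ++ [p.1])
                  else d.insert p.2 [p.1]) PySem.Dict.empty
  let sortedTuple := PySem.List.sorted d.items (fun kv => kv.1) true
  sortedTuple.foldl (fun ret kv => ret ++ kv.2) []

-- ===== PORT B =====
-- Source B: return sorted(range(len(scores)), key=lambda i: scores[i], reverse=True)
-- scores[i] with i drawn from range(len(scores)) is always in range; pyGetD with default 0 is exact there.
def order_from_scores_alt (scores : List Int) : List Int :=
  PySem.List.sorted (PySem.List.pyRange 0 (PySem.List.len scores))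
    (fun i => PySem.List.pyGetD scores i 0) true

-- ===== PRECONDITION & SPEC =====
def Spec_order_from_scores (scores : List Int) (out : List Int) : Prop := out = order_from_scores_alt scores
instance (scores : List Int) (out : List Int) : Decidable (Spec_order_from_scores scores out) := by unfold Spec_order_from_scores; infer_instance

-- ===== CLAIM (what is proved, stated in full; the proofs are below) =====
def Claim_equal_order_from_scores : Prop := ∀ (scores : List Int), Dom_order_from_scores scores → Spec_order_from_scores scores (order_from_scores scores)

-- ===== LEMMAS AND PROOFS =====

-- The step of A's dict loop is exactly Dict.modify (in the missing-key branch getD returns the default []).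
theorem pv_step_eq (d : PySem.Dict Int (List Int)) (p : Int × Int) :
    (if d.contains p.2 then d.modify p.2 [] (fun v => v ++ [p.1])
     else d.insert p.2 [p.1]) = d.modify p.2 [] (fun v => v ++ [p.1]) := by
  by_cases h : d.contains p.2
  · simp [h]
  · simp [h, PySem.Dict.modify, PySem.Dict.getD_of_not_contains d [] (by simpa using h)]

-- Stability of PySem's reverse sort: if the input is Pairwise P, the output is descending in the key
-- with ties still ordered by P.
theorem pv_insertBy_stable {α : Type} (key : α → Int) (P : α → α → Prop) (x : α) :
    ∀ acc : List α,
      acc.Pairwise (fun a b => key b < key a ∨ (key a = key b ∧ P a b)) →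
      (∀ y ∈ acc, key y = key x → P y x) →
      (PySem.List.insertBy (fun a b => decide (key b < key a)) x acc).Pairwise
        (fun a b => key b < key a ∨ (key a = key b ∧ P a b)) := by
  intro acc
  induction acc with
  | nil => intro _ _; simp [PySem.List.insertBy]
  | cons y ys ih =>
    intro hacc hPy
    rw [List.pairwise_cons] at hacc
    by_cases h : key y < key x
    · simp only [PySem.List.insertBy, h, decide_true, if_true]
      rw [List.pairwise_cons]
      refine ⟨?_, List.pairwise_cons.mpr hacc⟩
      intro z hz
      rcases List.mem_cons.mp hz with hz | hz
      · subst hz; exact Or.inl h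
      · rcases hacc.1 z hz with h' | h'
        · exact Or.inl (lt_trans h' h)
        · exact Or.inl (h'.1 ▸ h)
    · simp only [PySem.List.insertBy, h, decide_false, Bool.false_eq_true, if_false]
      rw [List.pairwise_cons]
      constructor
      · intro z hz
        rcases (PySem.List.mem_insertBy _ _ _ _).mp hz with hz | hz
        · subst hz
          rcases lt_or_eq_of_le (le_of_not_gt h) with h' | h'
          · exact Or.inl h'
          · exact Or.inr ⟨h'.symm, hPy y (by simp) h'.symm⟩
        · exact hacc.1 z hz
      · exact ih hacc.2 (fun y hy => hPy y (by simp [hy]))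

theorem pv_foldl_insertBy_stable {α : Type} (key : α → Int) (P : α → α → Prop) :
    ∀ (xs acc : List α),
      acc.Pairwise (fun a b => key b < key a ∨ (key a = key b ∧ P a b)) →
      (∀ y ∈ acc, ∀ x ∈ xs, key y = key x → P y x) →
      xs.Pairwise P →
      (xs.foldl (fun acc x => PySem.List.insertBy (fun a b => decide (key b < key a)) x acc) acc).Pairwise
        (fun a b => key b < key a ∨ (key a = key b ∧ P a b)) := by
  intro xs
  induction xs with
  | nil => intro acc h _ _; simpa using h
  | cons x xs ih =>
    intro acc hacc hmix hxs
    rw [List.pairwise_cons] at hxs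
    simp only [List.foldl_cons]
    refine ih _ (pv_insertBy_stable key P x acc hacc (fun y hy => hmix y hy x (by simp))) ?_ hxs.2
    intro y hy z hz
    rcases (PySem.List.mem_insertBy _ _ _ _).mp hy with hy | hy
    · subst hy; intro _; exact hxs.1 z hz
    · exact hmix y hy z (by simp [hz])

theorem pv_sorted_rev_stable {α : Type} (key : α → Int) (P : α → α → Prop) (xs : List α)
    (h : xs.Pairwise P) :
    (PySem.List.sorted xs key true).Pairwise
      (fun a b => key b < key a ∨ (key a = key b ∧ P a b)) := by
  rw [PySem.List.sorted_rev_eq_foldl_insertBy]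
  exact pv_foldl_insertBy_stable key P xs [] (by simp) (by simp) h

theorem pv_sum_ite_unique (a : Int) (c : Nat) :
    ∀ l : List Int, l.Nodup → a ∈ l →
      (l.map (fun k => if a = k then c else 0)).sum = c := by
  intro l
  induction l with
  | nil => simp
  | cons k l ih =>
    intro hnd hm
    rw [List.nodup_cons] at hnd
    rcases List.mem_cons.mp hm with h | h
    · subst h
      have : ∀ k' ∈ l, (if a = k' then c else 0) = 0 := by
        intro k' hk'; rw [if_neg]; rintro rfl; exact hnd.1 hk'
      simp [List.map_congr_left this]
    · have : a ≠ k := by rintro rfl; exact hnd.1 h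
      simp [this, ih hnd.2 h]

theorem pv_count_filter (x : Int) (p : Int → Bool) (l : List Int) :
    (l.filter p).count x = if p x then l.count x else 0 := by
  by_cases h : p x
  · rw [if_pos h, List.count_filter h]
  · rw [if_neg h, List.count_eq_zero]
    intro hmem
    exact h ((List.mem_filter.mp hmem).2)

-- ===== main proof =====

theorem pv_main (scores : List Int) :
    order_from_scores scores = order_from_scores_alt scores := by
  set n : Int := PySem.List.len scores with hn
  set R : List Int := PySem.List.pyRange 0 n with hR
  set keyf : Int → Int := fun i => PySem.List.pyGetD scores i 0 with hkeyf
  set bucket : Int → List Int := fun k => R.filter (fun j => keyf j == k) with hbucket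
  set Kd : List Int := PySem.List.sorted (PySem.Set.ofList scores) (fun x => x) true with hKd
  set K : Int → Int := fun i => -(keyf i) * (n + 1) + i with hK
  set d : PySem.Dict Int (List Int) :=
    (PySem.List.enumerate scores).foldl
      (fun d p => d.modify p.2 [] (fun v => v ++ [p.1])) PySem.Dict.empty with hd
  have hlen : n = (scores.length : Int) := rfl
  have hn0 : 0 ≤ n := by rw [hlen]; exact Int.natCast_nonneg scores.length
  -- ---- A unfolds to a flatMap over the reverse-sorted items of d ----
  have hstep : (fun (d : PySem.Dict Int (List Int)) (p : Int × Int) =>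
      if d.contains p.2 then d.modify p.2 [] (fun v => v ++ [p.1])
      else d.insert p.2 [p.1]) = (fun d p => d.modify p.2 [] (fun v => v ++ [p.1])) := by
    funext d p; exact pv_step_eq d p
  have hA : order_from_scores scores
      = (PySem.List.sorted d.items (fun kv => kv.1) true).flatMap (fun kv => kv.2) := by
    show ((PySem.List.sorted (PySem.Dict.items _) (fun kv => kv.1) true).foldl
        (fun ret kv => ret ++ kv.2) []) = _
    rw [hstep, PySem.List.foldl_append_eq_flatMap, List.nil_append, hd]
  -- ---- the dict's keys, nodup, values ----
  have hkeys : d.keys = PySem.Set.ofList scores := by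
    rw [hd, PySem.Dict.keys_foldl_modify_key (PySem.List.enumerate scores)
      (fun p => p.2) [] (fun _ p => fun v => v ++ [p.1]) PySem.Dict.empty,
      PySem.List.map_snd_enumerate]
    rfl
  have hnodup : d.keys.Nodup := by
    rw [hkeys]; exact PySem.Set.nodup_ofList scores
  have hgetD : ∀ k, d.getD k [] = bucket k := by
    intro k
    have hswap : d = ((PySem.List.enumerate scores).map Prod.swap).foldl
        (fun d q => d.modify q.1 [] (fun v => v ++ [q.2])) PySem.Dict.empty := by
      rw [hd, List.foldl_map]
      simp
    have hemp : (PySem.Dict.empty : PySem.Dict Int (List Int)).getD k [] = [] := rfl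
    rw [hswap, PySem.Dict.getD_foldl_modify_append, hemp, List.nil_append,
      PySem.List.enumerate_eq_map_pyRange scores 0, List.map_map, List.filter_map]
    simp [Function.comp_def, List.map_map, hbucket, hkeyf, hR, hn]
  have hitems : d.items = (PySem.Set.ofList scores).map (fun k => (k, bucket k)) := by
    rw [PySem.Dict.items_eq_map_keys d hnodup [], hkeys]
    exact List.map_congr_left (fun k _ => by rw [hgetD k])
  -- ---- Kd: descending distinct scores ----
  have hKdperm : Kd.Perm (PySem.Set.ofList scores) :=
    PySem.List.sorted_perm (PySem.Set.ofList scores) (fun x => x) true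
  have hKdnodup : Kd.Nodup := hKdperm.symm.nodup (PySem.Set.nodup_ofList scores)
  have hKdgt : Kd.Pairwise (fun a b => b < a) := by
    have h1 := PySem.List.sorted_pairwise_rev (PySem.Set.ofList scores) (fun x : Int => x)
    exact (h1.and hKdnodup).imp (fun h => lt_of_le_of_ne h.1 (fun e => h.2 e.symm))
  have hsortitems : PySem.List.sorted d.items (fun kv => kv.1) true
      = Kd.map (fun k => (k, bucket k)) := by
    apply PySem.List.sorted_rev_eq_of_perm_of_pairwise_gt
    · rw [hitems]; exact hKdperm.map _
    · rw [List.pairwise_map]; exact hKdgt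
  -- ---- index range facts ----
  have hmemR : ∀ i, i ∈ R ↔ 0 ≤ i ∧ i < n := fun i => PySem.List.mem_pyRange_one
  have hRlt : R.Pairwise (· < ·) := by
    have h1 := (List.pairwise_map (f := fun p : Int × Int => p.1)).mpr
      (PySem.List.pairwise_lt_enumerate scores 0)
    rw [PySem.List.map_fst_enumerate, zero_add] at h1
    exact h1
  have hKlt : ∀ i, i ∈ R → ∀ j, j ∈ R →
      (keyf j < keyf i ∨ (keyf i = keyf j ∧ i < j)) → K i < K j := by
    intro i hi j hj hS
    rw [hmemR] at hi hj
    rcases hS with h | ⟨he, hij⟩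
    · have hmul : -(keyf i) * (n + 1) ≤ (-(keyf j) - 1) * (n + 1) :=
        mul_le_mul_of_nonneg_right (by linarith) (by linarith)
      simp only [hK]; nlinarith
    · simp only [hK, he]; linarith
  -- ---- B: perm and K-sorted ----
  have hBalt : order_from_scores_alt scores = PySem.List.sorted R keyf true := rfl
  have hBperm : (PySem.List.sorted R keyf true).Perm R := PySem.List.sorted_perm R keyf true
  have hBK : (PySem.List.sorted R keyf true).Pairwise (fun a b => K a < K b) := by
    refine (pv_sorted_rev_stable keyf (· < ·) R hRlt).imp_of_mem ?_
    intro a b ha hb hS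
    rw [PySem.List.mem_sorted] at ha hb
    exact hKlt a ha b hb hS
  -- ---- A: perm and K-sorted ----
  have hbmem : ∀ k x, x ∈ bucket k → x ∈ R ∧ keyf x = k := by
    intro k x hx
    rw [hbucket] at hx
    have := List.mem_filter.mp hx
    exact ⟨this.1, by simpa using this.2⟩
  have hAK : (Kd.flatMap bucket).Pairwise (fun a b => K a < K b) := by
    rw [List.flatMap_def, List.pairwise_flatten]
    constructor
    · intro l hl
      rcases List.mem_map.mp hl with ⟨k, _, rfl⟩
      refine ((hRlt.filter _).imp_of_mem ?_ :
        (bucket k).Pairwise (fun a b => K a < K b))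
      intro a b ha hb hab
      rcases hbmem k a ha with ⟨haR, hak⟩
      rcases hbmem k b hb with ⟨hbR, hbk⟩
      exact hKlt a haR b hbR (Or.inr ⟨hak.trans hbk.symm, hab⟩)
    · rw [List.pairwise_map]
      refine hKdgt.imp_of_mem ?_
      intro k1 k2 _ _ hlt x hx y hy
      rcases hbmem k1 x hx with ⟨hxR, hxk⟩
      rcases hbmem k2 y hy with ⟨hyR, hyk⟩
      exact hKlt x hxR y hyR (Or.inl (by rw [hxk, hyk]; exact hlt))
  have hAperm : (Kd.flatMap bucket).Perm R := by
    rw [List.perm_iff_count]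
    intro x
    rw [List.count_flatMap]
    by_cases hx : x ∈ R
    · have hxb := (hmemR x).mp hx
      have hxk : keyf x ∈ Kd := by
        rw [hKd, PySem.List.mem_sorted, PySem.Set.mem_ofList]
        show PySem.List.pyGetD scores x 0 ∈ scores
        rw [PySem.List.pyGetD_eq_getElem scores 0 hxb.1 (by rw [← hlen]; exact hxb.2)]
        exact List.getElem_mem _
      have hterm : ∀ k ∈ Kd, (List.count x ∘ bucket) k
          = (fun k => if keyf x = k then R.count x else 0) k := by
        intro k _
        simp only [Function.comp_def, hbucket]
        rw [pv_count_filter]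
        simp [beq_iff_eq]
      rw [List.map_congr_left hterm,
        pv_sum_ite_unique (keyf x) (R.count x) Kd hKdnodup hxk]
    · have hterm : ∀ k ∈ Kd, (List.count x ∘ bucket) k = 0 := by
        intro k _
        simp only [Function.comp_def, hbucket]
        have h1 := List.Sublist.count_le (l₁ := R.filter (fun j => keyf j == k)) (l₂ := R)
          x List.filter_sublist
        have h2 : R.count x = 0 := List.count_eq_zero.mpr hx
        omega
      rw [List.map_congr_left hterm, List.count_eq_zero.mpr hx]
      simp
  -- ---- both sides are sorted R K ----
  have e1 : PySem.List.sorted R K = PySem.List.sorted R keyf true :=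
    PySem.List.sorted_eq_of_perm_of_pairwise_lt R _ K hBperm hBK
  have e2 : PySem.List.sorted R K = Kd.flatMap bucket :=
    PySem.List.sorted_eq_of_perm_of_pairwise_lt R _ K hAperm hAK
  rw [hA, hsortitems, List.flatMap_map, hBalt, ← e1, ← e2]

-- ===== VERDICT (by name: the statement is the Claim_ definition above) =====
theorem order_from_scores_spec : Claim_equal_order_from_scores := by
  intro scores _
  unfold Spec_order_from_scores
  exact pv_main scores
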